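-- pv_equiv track=rewrite | github.com/tomerfri12/gtm-db | scripts/import_csv.py | _aggregate_phase7_visitor_specs
-- ===== SOURCE A (Python) =====
-- from typing import Any
--
-- def _aggregate_phase7_visitor_specs(
--     visitor_rows: list[dict[str, str | None]],
-- ) -> list[dict[str, Any]]:
--     """One spec per distinct ``master_visitor_id`` (earliest install_date, first channel)."""
--     by_vid: dict[str, dict[str, Any]] = {}
--     for row in visitor_rows:
--         vid = (row.get("master_visitor_id") or "").strip()
--         if not vid:
--             continue
--         if vid not in by_vid:
--             by_vid[vid] = {"dates": [], "channels": []}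
--         inst = row.get("install_date")
--         if inst and str(inst).strip():
--             by_vid[vid]["dates"].append(str(inst).strip())
--         ch = row.get("grouped_channel")
--         if ch and str(ch).strip():
--             by_vid[vid]["channels"].append(str(ch).strip())
--     out: list[dict[str, Any]] = []
--     for vid, d in by_vid.items():
--         dates: list[str] = d["dates"]
--         chans: list[str] = d["channels"]
--         fs = min(dates) if dates else None
--         sc = chans[0] if chans else None
--         out.append(
--             {
--                 "visitor_id": vid,
--                 "source_channel": sc,
--                 "first_seen_at": fs,
--                 "created_reasoning": "CSV import: Visitor from master_visitor_id",
--             }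
--         )
--     return sorted(out, key=lambda x: x["visitor_id"])
-- ===== SOURCE B (Python) =====
-- def _aggregate_phase7_visitor_specs(visitor_rows):
--     """One pass: running earliest install_date and first channel per visitor id."""
--     acc = {}
--     for row in visitor_rows:
--         vid = (row.get("master_visitor_id") or "").strip()
--         if not vid:
--             continue
--         entry = acc.setdefault(vid, [None, None])
--         inst = row.get("install_date")
--         if inst:
--             t = inst.strip()
--             if t:
--                 if entry[0] is None or t < entry[0]:
--                     entry[0] = t
--         ch = row.get("grouped_channel")
--         if ch:
--             c = ch.strip()
--             if c:
--                 if entry[1] is None: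
--                     entry[1] = c
--     return sorted(
--         (
--             {
--                 "visitor_id": vid,
--                 "source_channel": e[1],
--                 "first_seen_at": e[0],
--                 "created_reasoning": "CSV import: Visitor from master_visitor_id",
--             }
--             for vid, e in acc.items()
--         ),
--         key=lambda x: x["visitor_id"],
--     )
-- ===== Notes on version B (the rewrite author's own statement) =====
-- stated objective: alternative
-- what changed: Single pass keeping only a running earliest install_date and first non-empty channel per visitor id (O(1) state per visitor), instead of accumulating whole date/channel lists per visitor and taking min/first in a second loop.
import Mathlib
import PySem

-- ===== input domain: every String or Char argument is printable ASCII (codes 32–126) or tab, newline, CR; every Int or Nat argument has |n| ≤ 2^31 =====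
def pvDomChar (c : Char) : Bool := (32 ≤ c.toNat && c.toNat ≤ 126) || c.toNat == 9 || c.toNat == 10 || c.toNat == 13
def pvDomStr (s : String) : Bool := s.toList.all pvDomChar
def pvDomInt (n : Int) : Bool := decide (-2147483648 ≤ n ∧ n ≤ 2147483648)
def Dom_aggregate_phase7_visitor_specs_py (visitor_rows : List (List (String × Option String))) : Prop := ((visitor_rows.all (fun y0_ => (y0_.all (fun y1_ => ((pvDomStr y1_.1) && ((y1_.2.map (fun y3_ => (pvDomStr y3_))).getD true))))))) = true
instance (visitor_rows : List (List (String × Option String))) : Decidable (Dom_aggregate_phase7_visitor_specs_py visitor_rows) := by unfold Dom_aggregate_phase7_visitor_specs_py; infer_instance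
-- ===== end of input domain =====

-- B replaces A's per-visitor date/channel lists (min taken afterwards) by a single pass keeping a
-- running earliest date and first channel per visitor id (objective: alternative decomposition).

-- ===== PORT A =====
-- row.get(k): first-match lookup in the association list; the value itself may be None, hence .join
def pvRowGet (row : List (String × Option String)) (k : String) : Option String :=
  ((PySem.Dict.mk row).get? k).join

-- Python '(v or "")' on an Optional[str]: None and "" are falsy
def pvOrEmpty (v : Option String) : String :=
  match v with
  | some s => if s = "" then "" else s
  | none => ""

-- sort key x["visitor_id"]: every record built below carries ("visitor_id", some vid), so the
-- (.getD "") never meets its default; exact on the records this function sorts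
def pvSortKey (x : List (String × Option String)) : String :=
  ((PySem.Dict.mk x).getD "visitor_id" none).getD ""

-- the body of A's first 'for row in visitor_rows' loop
def pvStepA (d : PySem.Dict String (List String × List String)) (row : List (String × Option String)) : PySem.Dict String (List String × List String) :=
  let vid := PySem.Str.strip (pvOrEmpty (pvRowGet row "master_visitor_id"))
  if vid = "" then d
  else
    let d1 := if d.contains vid then d else d.insert vid ([], [])
    let d2 := match pvRowGet row "install_date" with
      | some s => if s ≠ "" ∧ PySem.Str.strip s ≠ "" then
          d1.modify vid ([], []) (fun v => (v.1 ++ [PySem.Str.strip s], v.2)) else d1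
      | none => d1
    let d3 := match pvRowGet row "grouped_channel" with
      | some s => if s ≠ "" ∧ PySem.Str.strip s ≠ "" then
          d2.modify vid ([], []) (fun v => (v.1, v.2 ++ [PySem.Str.strip s])) else d2
      | none => d2
    d3

def aggregate_phase7_visitor_specs_py (visitor_rows : List (List (String × Option String))) : List (List (String × Option String)) :=
  let by_vid := visitor_rows.foldl pvStepA PySem.Dict.empty
  let out := by_vid.items.foldl (fun acc p =>
    let fs := if p.2.1 ≠ [] then PySem.List.min? p.2.1 (fun x => x) else none
    let sc := if p.2.2 ≠ [] then p.2.2.head? else none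
    acc ++ [[("visitor_id", some p.1), ("source_channel", sc), ("first_seen_at", fs),
             ("created_reasoning", some "CSV import: Visitor from master_visitor_id")]]) []
  PySem.List.sorted out pvSortKey

-- ===== PORT B =====
-- the body of B's single 'for row in visitor_rows' loop: entry = [first_seen_at, source_channel]
def pvStepB (d : PySem.Dict String (Option String × Option String)) (row : List (String × Option String)) : PySem.Dict String (Option String × Option String) :=
  let vid := PySem.Str.strip (pvOrEmpty (pvRowGet row "master_visitor_id"))
  if vid = "" then d
  else
    let d1 := d.setdefault vid (none, none)
    let d2 := match pvRowGet row "install_date" with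
      | some s =>
        if s ≠ "" then
          let t := PySem.Str.strip s
          if t ≠ "" then
            d1.modify vid (none, none) (fun e =>
              (match e.1 with
               | none => some t
               | some m => if t < m then some t else some m, e.2))
          else d1
        else d1
      | none => d1
    let d3 := match pvRowGet row "grouped_channel" with
      | some s =>
        if s ≠ "" then
          let c := PySem.Str.strip s
          if c ≠ "" then
            d2.modify vid (none, none) (fun e =>
              (e.1, match e.2 with
                    | none => some c
                    | some m => some m))
          else d2
        else d2
      | none => d2
    d3

def pvRecB (p : String × (Option String × Option String)) : List (String × Option String) :=
  [("visitor_id", some p.1), ("source_channel", p.2.2), ("first_seen_at", p.2.1),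
   ("created_reasoning", some "CSV import: Visitor from master_visitor_id")]

def aggregate_phase7_visitor_specs_py_alt (visitor_rows : List (List (String × Option String))) : List (List (String × Option String)) :=
  let acc := visitor_rows.foldl pvStepB PySem.Dict.empty
  PySem.List.sorted (acc.items.map pvRecB) pvSortKey

-- ===== PRECONDITION & SPEC =====
def Spec_aggregate_phase7_visitor_specs_py (visitor_rows : List (List (String × Option String))) (out : List (List (String × Option String))) : Prop := out = aggregate_phase7_visitor_specs_py_alt visitor_rows
instance (visitor_rows : List (List (String × Option String))) (out : List (List (String × Option String))) : Decidable (Spec_aggregate_phase7_visitor_specs_py visitor_rows out) := by unfold Spec_aggregate_phase7_visitor_specs_py; infer_instance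

-- ===== CLAIM (what is proved, stated in full; the proofs are below) =====
def Claim_equal_aggregate_phase7_visitor_specs_py : Prop := ∀ (visitor_rows : List (List (String × Option String))), Dom_aggregate_phase7_visitor_specs_py visitor_rows → Spec_aggregate_phase7_visitor_specs_py visitor_rows (aggregate_phase7_visitor_specs_py visitor_rows)

-- ===== LEMMAS AND PROOFS =====

-- abstraction: B's per-visitor entry is the (running min, first element) view of A's lists
def pvTr (v : List String × List String) : Option String × Option String :=
  (PySem.List.min? v.1 (fun x => x), v.2.head?)

def pvTrP (p : String × (List String × List String)) : String × (Option String × Option String) :=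
  (p.1, pvTr p.2)

def pvMapD (d : PySem.Dict String (List String × List String)) : PySem.Dict String (Option String × Option String) :=
  PySem.Dict.mk (d.items.map pvTrP)

lemma pvContains_mapD (d : PySem.Dict String (List String × List String)) (k : String) :
    (pvMapD d).contains k = d.contains k := by
  simp only [pvMapD, PySem.Dict.contains, List.any_map]
  congr 1

lemma pvGet?_mapD (d : PySem.Dict String (List String × List String)) (k : String) :
    (pvMapD d).get? k = (d.get? k).map pvTr := by
  simp only [pvMapD, PySem.Dict.get?, List.find?_map]
  have : ((fun p : String × (Option String × Option String) => p.1 == k) ∘ pvTrP)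
      = (fun p : String × (List String × List String) => p.1 == k) := by
    funext p; simp [pvTrP, Function.comp]
  rw [this]
  cases d.items.find? (fun p => p.1 == k) <;> simp [pvTrP]

lemma pvGetD_mapD (d : PySem.Dict String (List String × List String)) (k : String) (dflt : List String × List String) :
    (pvMapD d).getD k (pvTr dflt) = pvTr (d.getD k dflt) := by
  rw [PySem.Dict.getD_eq_get?_getD, PySem.Dict.getD_eq_get?_getD, pvGet?_mapD]
  cases d.get? k <;> simp

lemma pvInsert_mapD (d : PySem.Dict String (List String × List String)) (k : String) (v : List String × List String) :
    (pvMapD d).insert k (pvTr v) = pvMapD (d.insert k v) := by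
  simp only [PySem.Dict.insert, pvContains_mapD]
  by_cases h : d.contains k = true
  · simp only [h, if_true, pvMapD, List.map_map]
    refine congrArg PySem.Dict.mk (List.map_congr_left (fun p _ => ?_))
    by_cases hp : p.1 == k <;> simp [pvTrP, hp, Function.comp]
  · simp [h, pvMapD, pvTrP]

lemma pvModify_mapD (d : PySem.Dict String (List String × List String)) (k : String)
    (dflt : List String × List String) (f : List String × List String → List String × List String)
    (g : Option String × Option String → Option String × Option String)
    (h : ∀ v, g (pvTr v) = pvTr (f v)) :
    (pvMapD d).modify k (pvTr dflt) g = pvMapD (d.modify k dflt f) := by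
  simp only [PySem.Dict.modify]
  rw [pvGetD_mapD, h, pvInsert_mapD]

lemma pvMin?_append_singleton (ds : List String) (t : String) :
    PySem.List.min? (ds ++ [t]) (fun x => x)
      = (match PySem.List.min? ds (fun x => x) with
         | none => some t
         | some m => if t < m then some t else some m) := by
  simp only [PySem.List.min?, List.foldl_append, List.foldl_cons, List.foldl_nil]
  split <;> rename_i h <;> rw [h]

lemma pvHead?_append_singleton (cs : List String) (c : String) :
    (cs ++ [c]).head? = (match cs.head? with | none => some c | some m => some m) := by
  cases cs <;> simp

lemma pvStep_comm (d : PySem.Dict String (List String × List String)) (row : List (String × Option String)) :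
    pvStepB (pvMapD d) row = pvMapD (pvStepA d row) := by
  unfold pvStepA pvStepB
  by_cases hvid : PySem.Str.strip (pvOrEmpty (pvRowGet row "master_visitor_id")) = ""
  · simp [hvid]
  · simp only [hvid, if_false]
    set vid := PySem.Str.strip (pvOrEmpty (pvRowGet row "master_visitor_id")) with hv
    -- the created/ensured entry
    have hd1 : (pvMapD d).setdefault vid (none, none)
        = pvMapD (if d.contains vid then d else d.insert vid ([], [])) := by
      by_cases hc : d.contains vid = true
      · rw [PySem.Dict.setdefault_of_contains]
        · simp [hc]
        · rw [pvContains_mapD]; exact hc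
      · rw [PySem.Dict.setdefault_of_not_contains]
        · have : (none, none) = pvTr ([], []) := by simp [pvTr, PySem.List.min?]
          rw [this, pvInsert_mapD]
          simp [eq_false_of_ne_true hc]
        · rw [pvContains_mapD]; exact eq_false_of_ne_true hc
    rw [hd1]
    set dA1 := if d.contains vid then d else d.insert vid ([], []) with hA1
    -- install_date
    have hdflt : ((none, none) : Option String × Option String) = pvTr ([], []) := by
      simp [pvTr, PySem.List.min?]
    have hd2 : ∀ dA : PySem.Dict String (List String × List String),
        (match pvRowGet row "install_date" with
          | some s =>
            if s ≠ "" then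
              let t := PySem.Str.strip s
              if t ≠ "" then
                (pvMapD dA).modify vid (none, none) (fun e =>
                  (match e.1 with
                   | none => some t
                   | some m => if t < m then some t else some m, e.2))
              else pvMapD dA
            else pvMapD dA
          | none => pvMapD dA)
        = pvMapD (match pvRowGet row "install_date" with
          | some s => if s ≠ "" ∧ PySem.Str.strip s ≠ "" then
              dA.modify vid ([], []) (fun v => (v.1 ++ [PySem.Str.strip s], v.2)) else dA
          | none => dA) := by
      intro dA
      cases hr : pvRowGet row "install_date" with
      | none => rfl
      | some s =>
        by_cases hs : s = ""
        · simp [hs]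
        · by_cases ht : PySem.Str.strip s = ""
          · simp [hs, ht]
          · simp only [hs, ht, ne_eq, not_false_iff, and_self, if_true]
            rw [hdflt]
            exact pvModify_mapD dA vid ([], []) _ _ (fun v => by
              simp only [pvTr, pvMin?_append_singleton])
    rw [hd2 dA1]
    set dA2 := (match pvRowGet row "install_date" with
      | some s => if s ≠ "" ∧ PySem.Str.strip s ≠ "" then
          dA1.modify vid ([], []) (fun v => (v.1 ++ [PySem.Str.strip s], v.2)) else dA1
      | none => dA1) with hA2
    -- grouped_channel
    cases hr : pvRowGet row "grouped_channel" with
    | none => rfl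
    | some s =>
      by_cases hs : s = ""
      · simp [hs]
      · by_cases hc : PySem.Str.strip s = ""
        · simp [hs, hc]
        · simp only [hs, hc, ne_eq, not_false_iff, and_self, if_true]
          rw [hdflt]
          exact pvModify_mapD dA2 vid ([], []) _ _ (fun v => by
            simp only [pvTr, pvHead?_append_singleton])

lemma pvFold_comm (rows : List (List (String × Option String))) (d : PySem.Dict String (List String × List String)) :
    rows.foldl pvStepB (pvMapD d) = pvMapD (rows.foldl pvStepA d) := by
  induction rows generalizing d with
  | nil => rfl
  | cons r rs ih => simp only [List.foldl_cons, pvStep_comm, ih]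

lemma pvRecB_tr (p : String × (List String × List String)) :
    pvRecB (pvTrP p)
      = [("visitor_id", some p.1),
         ("source_channel", if p.2.2 ≠ [] then p.2.2.head? else none),
         ("first_seen_at", if p.2.1 ≠ [] then PySem.List.min? p.2.1 (fun x => x) else none),
         ("created_reasoning", some "CSV import: Visitor from master_visitor_id")] := by
  obtain ⟨k, ds, cs⟩ := p
  simp only [pvRecB, pvTrP, pvTr]
  cases ds <;> cases cs <;> simp [PySem.List.min?]

-- ===== VERDICT (by name: the statement is the Claim_ definition above) =====
theorem aggregate_phase7_visitor_specs_py_spec : Claim_equal_aggregate_phase7_visitor_specs_py := by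
  intro rows _
  show aggregate_phase7_visitor_specs_py rows = aggregate_phase7_visitor_specs_py_alt rows
  unfold aggregate_phase7_visitor_specs_py aggregate_phase7_visitor_specs_py_alt
  have hempty : (PySem.Dict.empty : PySem.Dict String (Option String × Option String))
      = pvMapD PySem.Dict.empty := rfl
  rw [hempty, pvFold_comm]
  set dA := rows.foldl pvStepA PySem.Dict.empty with hdA
  have hout : dA.items.foldl (fun acc p =>
      let fs := if p.2.1 ≠ [] then PySem.List.min? p.2.1 (fun x => x) else none
      let sc := if p.2.2 ≠ [] then p.2.2.head? else none
      acc ++ [[("visitor_id", some p.1), ("source_channel", sc), ("first_seen_at", fs),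
               ("created_reasoning", some "CSV import: Visitor from master_visitor_id")]]) []
      = (pvMapD dA).items.map pvRecB := by
    rw [PySem.List.foldl_append_singleton_eq_map]
    simp only [pvMapD, List.map_map, List.nil_append]
    exact List.map_congr_left (fun p _ => by rw [Function.comp_apply, pvRecB_tr])
  exact congrArg (fun l => PySem.List.sorted l pvSortKey) hout
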